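-- pv_equiv track=rewrite | github.com/harikaravula/AI-agent-based-healthcare-enterprise-database-system-management | agents/schema_agent.py | _route_next_action
-- ===== SOURCE A (Python) =====
-- from typing import Dict, List, Any, Optional, Callable
--
-- def _route_next_action(verification: Dict) -> Dict[str, str]:
--     """Determine the next action based on verification results."""
--
--     issues = verification.get("issues", [])
--
--     if not issues:
--         return {"type": "complete", "reason": "No issues found"}
--
--     # Prioritize critical issues
--     critical = [i for i in issues if i.get("severity") == "critical"]
--     if critical:
--         return {
--             "type": "refine",
--             "reason": f"Fix critical issue: {critical[0]['description']}"
--         }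
--
--     # Then warnings
--     warnings = [i for i in issues if i.get("severity") == "warning"]
--     if warnings:
--         return {
--             "type": "refine",
--             "reason": f"Address warning: {warnings[0]['description']}"
--         }
--
--     return {"type": "complete", "reason": "Only minor issues remain"}
-- ===== SOURCE B (Python) =====
-- def _route_next_action(verification):
--     """Determine the next action based on verification results."""
--     issues = verification.get("issues", [])
--     first_critical = None
--     first_warning = None
--     for i in issues:
--         sev = i.get("severity")
--         if sev == "critical":
--             first_critical = i
--             break
--         if sev == "warning" and first_warning is None:
--             first_warning = i
--     if not issues:
--         return {"type": "complete", "reason": "No issues found"}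
--     if first_critical is not None:
--         return {"type": "refine", "reason": f"Fix critical issue: {first_critical['description']}"}
--     if first_warning is not None:
--         return {"type": "refine", "reason": f"Address warning: {first_warning['description']}"}
--     return {"type": "complete", "reason": "Only minor issues remain"}
-- ===== Notes on version B (the rewrite author's own statement) =====
-- stated objective: alternative
-- what changed: Replaces the two filtered list comprehensions over issues with a single pass that tracks the first critical and first warning issue and breaks early at the first critical one.
import Mathlib
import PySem

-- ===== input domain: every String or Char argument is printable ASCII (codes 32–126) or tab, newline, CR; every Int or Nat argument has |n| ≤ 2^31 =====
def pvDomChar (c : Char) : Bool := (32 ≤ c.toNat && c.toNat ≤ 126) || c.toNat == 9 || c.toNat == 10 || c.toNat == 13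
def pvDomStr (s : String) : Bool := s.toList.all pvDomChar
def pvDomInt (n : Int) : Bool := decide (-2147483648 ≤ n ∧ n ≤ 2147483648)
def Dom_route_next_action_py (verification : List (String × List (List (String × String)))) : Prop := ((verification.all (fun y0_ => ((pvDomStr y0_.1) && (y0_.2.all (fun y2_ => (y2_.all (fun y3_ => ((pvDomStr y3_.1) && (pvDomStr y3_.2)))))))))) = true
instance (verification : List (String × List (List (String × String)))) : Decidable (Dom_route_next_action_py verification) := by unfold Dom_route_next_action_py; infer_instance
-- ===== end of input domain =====

-- B replaces A's two filtered comprehensions by one pass over issues that records the first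
-- critical and first warning issue and stops at the first critical one (alternative decomposition).

-- shared dict-access helpers (both ports and Pre_ use them; lookup = first match)
def pvSev (i : List (String × String)) : Option String := (PySem.Dict.mk i).get? "severity"
def pvDesc (i : List (String × String)) : Option String := (PySem.Dict.mk i).get? "description"
def pvIssues (verification : List (String × List (List (String × String)))) : List (List (String × String)) :=
  ((PySem.Dict.mk verification).get? "issues").getD []

-- ===== PORT A =====
def route_next_action_py (verification : List (String × List (List (String × String)))) : List (String × String) :=
  let issues := pvIssues verification
  if issues.isEmpty then [("type", "complete"), ("reason", "No issues found")]
  else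
    match issues.filter (fun i => pvSev i == some "critical") with
    | c :: _ => [("type", "refine"), ("reason", "Fix critical issue: " ++ (pvDesc c).getD "")]
      -- Pre_ guarantees the "description" key is present on the selected issue (Python raises KeyError otherwise)
    | [] =>
      match issues.filter (fun i => pvSev i == some "warning") with
      | w :: _ => [("type", "refine"), ("reason", "Address warning: " ++ (pvDesc w).getD "")]
      | [] => [("type", "complete"), ("reason", "Only minor issues remain")]

-- ===== PORT B =====
-- single pass: returns (first critical if any — stopping there, first warning seen before it)
def pvScan : List (List (String × String)) → Option (List (String × String)) →
    Option (List (String × String)) × Option (List (String × String))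
  | [], fw => (none, fw)
  | i :: rest, fw =>
    if pvSev i == some "critical" then (some i, fw)
    else if pvSev i == some "warning" && fw.isNone then pvScan rest (some i)
    else pvScan rest fw

def route_next_action_py_alt (verification : List (String × List (List (String × String)))) : List (String × String) :=
  let issues := pvIssues verification
  let r := pvScan issues none
  match issues with
  | [] => [("type", "complete"), ("reason", "No issues found")]
  | _ :: _ =>
    match r.1 with
    | some c => [("type", "refine"), ("reason", "Fix critical issue: " ++ (pvDesc c).getD "")]
    | none =>
      match r.2 with
      | some w => [("type", "refine"), ("reason", "Address warning: " ++ (pvDesc w).getD "")]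
      | none => [("type", "complete"), ("reason", "Only minor issues remain")]

-- ===== PRECONDITION & SPEC =====
-- Pre_ excludes exactly the inputs on which Python A raises KeyError: the selected issue
-- (first critical, else first warning) lacks a "description" key.
def Pre_route_next_action_py (verification : List (String × List (List (String × String)))) : Prop :=
  (match (pvIssues verification).filter (fun i => pvSev i == some "critical") with
   | c :: _ => (pvDesc c).isSome
   | [] =>
     match (pvIssues verification).filter (fun i => pvSev i == some "warning") with
     | w :: _ => (pvDesc w).isSome
     | [] => true) = true
instance (verification : List (String × List (List (String × String)))) : Decidable (Pre_route_next_action_py verification) := by unfold Pre_route_next_action_py; infer_instance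

def pvWitness_route_next_action_py : (List (String × List (List (String × String)))) :=
  [("issues", [[("severity", "warning"), ("description", "d")]])]

def Spec_route_next_action_py (verification : List (String × List (List (String × String)))) (out : List (String × String)) : Prop := out = route_next_action_py_alt verification
instance (verification : List (String × List (List (String × String)))) (out : List (String × String)) : Decidable (Spec_route_next_action_py verification out) := by unfold Spec_route_next_action_py; infer_instance

-- ===== CLAIM (what is proved, stated in full; the proofs are below) =====
def Claim_equal_route_next_action_py : Prop := ∀ (verification : List (String × List (List (String × String)))), Dom_route_next_action_py verification → Pre_route_next_action_py verification → Spec_route_next_action_py verification (route_next_action_py verification)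

-- ===== LEMMAS AND PROOFS =====

-- the scan finds the first critical issue; if there is none, its warning slot is the accumulator
-- if already set, else the first warning issue.
theorem pvScan_spec (issues : List (List (String × String))) (fw : Option (List (String × String))) :
    (pvScan issues fw).1 = issues.find? (fun i => pvSev i == some "critical") ∧
    ((pvScan issues fw).1 = none →
      (pvScan issues fw).2 =
        (match fw with
         | some x => some x
         | none => issues.find? (fun i => pvSev i == some "warning"))) := by
  induction issues generalizing fw with
  | nil => cases fw <;> simp [pvScan]
  | cons i rest ih =>
    by_cases hc : pvSev i == some "critical"
    · simp [pvScan, hc, List.find?_cons_of_pos]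
    · have hc' : (pvSev i == some "critical") = false := by simpa using hc
      by_cases hw : pvSev i == some "warning"
      · cases fw with
        | none =>
          simpa [pvScan, hc', hw, List.find?_cons] using ih (some i)
        | some x =>
          simpa [pvScan, hc', hw, List.find?_cons] using ih (some x)
      · have hw' : (pvSev i == some "warning") = false := by simpa using hw
        simpa [pvScan, hc', hw', List.find?_cons] using ih fw

-- ===== VERDICT (by name: the statement is the Claim_ definition above) =====
theorem route_next_action_py_spec : Claim_equal_route_next_action_py := by
  intro v _ _
  unfold Spec_route_next_action_py route_next_action_py route_next_action_py_alt
  cases hiss : pvIssues v with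
  | nil => simp
  | cons i rest =>
    obtain ⟨h1, h2⟩ := pvScan_spec (i :: rest) none
    simp only [List.isEmpty_cons, Bool.false_eq_true, if_false]
    cases hc : (i :: rest).filter (fun j => pvSev j == some "critical") with
    | cons c cs =>
      have hf : (i :: rest).find? (fun j => pvSev j == some "critical") = some c := by
        rw [← List.head?_filter, hc]; rfl
      rw [hf] at h1
      simp [h1]
    | nil =>
      have hf : (i :: rest).find? (fun j => pvSev j == some "critical") = none := by
        rw [← List.head?_filter, hc]; rfl
      rw [hf] at h1
      have h2' := h2 h1
      simp only at h2'
      cases hw : (i :: rest).filter (fun j => pvSev j == some "warning") with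
      | cons w ws =>
        have hfw : (i :: rest).find? (fun j => pvSev j == some "warning") = some w := by
          rw [← List.head?_filter, hw]; rfl
        rw [hfw] at h2'
        simp [h1, h2']
      | nil =>
        have hfw : (i :: rest).find? (fun j => pvSev j == some "warning") = none := by
          rw [← List.head?_filter, hw]; rfl
        rw [hfw] at h2'
        simp [h1, h2']
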